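-- pv_equiv track=rewrite | github.com/whyj107/CodeWar | 20220819_How Many Numbers.py | sel_number
-- ===== SOURCE A (Python) =====
-- def sel_number(n, d):
--     if n // 10 < 0: return
--     else:
--         result = []
--         for num in range(12, n + 1):
--             lst = [int(i) for i in str(num)]
--             if lst == sorted(lst) and sum(lst) == sum(set(lst)):
--                 cnt = 0
--                 for i in range(len(lst) - 1):
--                     if lst[i + 1] - lst[i] <= d:
--                         cnt += 1
--                 if cnt == len(lst) - 1:
--                     result.append(num)
--         return len(result)
-- ===== SOURCE B (Python) =====
-- def sel_number(n, d):
--     # DFS over strictly-increasing, gap-bounded digit sequences: O(1) nodes (< 2^9)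
--     # instead of scanning every number up to n.
--     def go(v, last):
--         c = 1 if 12 <= v <= n else 0
--         for nd in range(last + 1, min(9, last + d) + 1):
--             if v * 10 + nd <= n:
--                 c += go(v * 10 + nd, nd)
--         return c
--     return sum(go(a, a) for a in range(1, 10))
-- ===== Notes on version B (the rewrite author's own statement) =====
-- stated objective: faster
-- what changed: A scans every number in [12, n] and tests its digit string (sort + set + gap loop); B instead does a DFS over the at most 2^9 strictly-increasing gap-bounded digit sequences, counting those whose value lands in [12, n], so its work is independent of n.
-- outside the precondition, e.g. on sel_number(-5, 2): A returns None, B returns 0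
import Mathlib
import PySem

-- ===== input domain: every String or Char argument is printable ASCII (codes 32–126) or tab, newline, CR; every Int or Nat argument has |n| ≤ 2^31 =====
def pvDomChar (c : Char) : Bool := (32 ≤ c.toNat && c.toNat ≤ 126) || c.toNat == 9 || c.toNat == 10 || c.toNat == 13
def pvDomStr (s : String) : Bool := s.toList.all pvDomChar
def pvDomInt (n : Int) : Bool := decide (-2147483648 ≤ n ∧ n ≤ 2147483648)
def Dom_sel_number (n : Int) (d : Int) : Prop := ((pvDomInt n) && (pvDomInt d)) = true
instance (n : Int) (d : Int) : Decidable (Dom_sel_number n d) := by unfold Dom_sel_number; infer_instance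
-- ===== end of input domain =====

-- B replaces A's scan of every number in [12, n] by a DFS over the (at most 2^9) strictly
-- increasing gap-bounded digit sequences, so its work is independent of n (objective: faster).

-- ===== PORT A =====
def sel_number (n : Int) (d : Int) : Int :=
  if PySem.Int.floordiv n 10 < 0 then 0  -- Python returns None here; excluded by Pre_sel_number
  else
    let result : List Int :=
      (PySem.List.pyRange 12 (n + 1) 1).foldl (fun result num =>
        -- int(i) for i in str(num): exact, since str(num) for num ≥ 12 is all digit chars
        let lst : List Int := (PySem.Int.toChars num).map (fun i => (i.toNat : Int) - 48)
        if lst = PySem.List.sorted lst (fun x => x) false ∧ lst.sum = (PySem.Set.ofList lst).sum then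
          let cnt : Int := (PySem.List.pyRange 0 (PySem.List.len lst - 1) 1).foldl
            (fun cnt i =>
              if PySem.List.pyGetD lst (i + 1) 0 - PySem.List.pyGetD lst i 0 ≤ d then cnt + 1
              else cnt) 0
          if cnt = PySem.List.len lst - 1 then result ++ [num] else result
        else result) []
    PySem.List.len result

-- ===== PORT B =====
def pvGo (n : Int) (d : Int) (v : Int) (last : Int) : Int :=
  let c : Int := if 12 ≤ v ∧ v ≤ n then 1 else 0
  (PySem.List.pyRange (last + 1) (min 9 (last + d) + 1) 1).attach.foldl
    (fun c nd => if v * 10 + nd.1 ≤ n then c + pvGo n d (v * 10 + nd.1) nd.1 else c) c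
termination_by (9 - last).toNat
decreasing_by
  have h := (PySem.List.mem_pyRange_one).1 nd.2
  omega

def sel_number_alt (n : Int) (d : Int) : Int :=
  ((PySem.List.pyRange 1 10 1).map (fun a => pvGo n d a a)).sum

-- ===== PRECONDITION & SPEC =====
-- Pre_ excludes exactly n < 0, where the Python A returns None — not a value of the declared int type.
def Pre_sel_number (n : Int) (d : Int) : Prop := 0 ≤ n
instance (n : Int) (d : Int) : Decidable (Pre_sel_number n d) := by unfold Pre_sel_number; infer_instance
def pvWitness_sel_number : Int × Int := (25, 2)

def Spec_sel_number (n : Int) (d : Int) (out : Int) : Prop := out = sel_number_alt n d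
instance (n : Int) (d : Int) (out : Int) : Decidable (Spec_sel_number n d out) := by unfold Spec_sel_number; infer_instance

-- ===== CLAIM (what is proved, stated in full; the proofs are below) =====
def Claim_equal_sel_number : Prop := ∀ (n : Int) (d : Int), Dom_sel_number n d → Pre_sel_number n d → Spec_sel_number n d (sel_number n d)

-- ===== LEMMAS AND PROOFS =====

def pvDig (m : Int) : List Int := ((Nat.digits 10 m.toNat).map (fun k : ℕ => (k : Int))).reverse
def pvExt (v : Int) (ds : List Int) : Int := ds.foldl (fun w x => w * 10 + x) v

theorem pvDig_mem (m : Int) : ∀ x ∈ pvDig m, 0 ≤ x ∧ x < 10 := by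
  intro x hx
  simp only [pvDig, List.mem_reverse, List.mem_map] at hx
  obtain ⟨k, hk, rfl⟩ := hx
  have := Nat.digits_lt_base (b := 10) (by norm_num) hk
  omega

theorem pvDig_single (a : Int) (h1 : 1 ≤ a) (h9 : a ≤ 9) : pvDig a = [a] := by
  interval_cases a <;> decide

theorem pvDig_append (w x : Int) (hw : 1 ≤ w) (hx0 : 0 ≤ x) (hx : x < 10) :
    pvDig (w * 10 + x) = pvDig w ++ [x] := by
  have h1 : (w * 10 + x).toNat = 10 * w.toNat + x.toNat := by omega
  have h2 : 0 < 10 * w.toNat + x.toNat := by omega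
  have h3 : Nat.digits 10 (10 * w.toNat + x.toNat) = x.toNat :: Nat.digits 10 w.toNat := by
    rw [Nat.digits_def' (by norm_num : (1:ℕ) < 10) h2]
    congr 1
    · omega
    · congr 1; omega
  have h4 : ((x.toNat : ℕ) : ℤ) = x := by omega
  simp only [pvDig, h1, h3, List.map_cons, List.reverse_cons, h4]

theorem pvExt_le (v : Int) (ds : List Int) (hv : 1 ≤ v) (hds : ∀ x ∈ ds, 0 ≤ x) :
    v ≤ pvExt v ds := by
  induction ds generalizing v with
  | nil => simp [pvExt]
  | cons y t ih =>
    have hy : 0 ≤ y := hds y (List.mem_cons_self)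
    have := ih (v * 10 + y) (by omega) (fun x hx => hds x (List.mem_cons_of_mem _ hx))
    simp only [pvExt, List.foldl_cons] at *
    omega

theorem pvDig_ext (v : Int) (ds : List Int) (hv : 1 ≤ v) (hds : ∀ x ∈ ds, 0 ≤ x ∧ x < 10) :
    pvDig (pvExt v ds) = pvDig v ++ ds := by
  induction ds using List.reverseRecOn with
  | nil => simp [pvExt]
  | append_singleton t x ih =>
    have hx := hds x (by simp)
    have ht : ∀ y ∈ t, 0 ≤ y ∧ y < 10 := fun y hy => hds y (by simp [hy])
    have hext : 1 ≤ pvExt v t := le_trans hv (pvExt_le v t hv (fun y hy => (ht y hy).1))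
    have hstep : pvExt v (t ++ [x]) = (pvExt v t) * 10 + x := by
      simp [pvExt, List.foldl_append]
    rw [hstep, pvDig_append _ _ hext hx.1 hx.2, ih ht, List.append_assoc]

theorem pvExt_dig_aux (l : List ℕ) (v : Int) :
    ((l.map (fun k : ℕ => (k : Int))).reverse).foldl (fun w x => w * 10 + x) v
      = v * 10 ^ l.length + ((Nat.ofDigits 10 l : ℕ) : ℤ) := by
  induction l generalizing v with
  | nil => simp
  | cons a t ih =>
    rw [List.map_cons, List.reverse_cons, List.foldl_append, List.foldl_cons, List.foldl_nil,
      ih, Nat.ofDigits_cons, List.length_cons]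
    push_cast
    ring

theorem pvExt_dig (m : Int) (hm : 0 ≤ m) : pvExt 0 (pvDig m) = m := by
  have h := pvExt_dig_aux (Nat.digits 10 m.toNat) 0
  rw [Nat.ofDigits_digits] at h
  simp only [pvDig, pvExt, h]
  omega

theorem pvDig_head (m : Int) (hm : 1 ≤ m) :
    ∃ a ds, pvDig m = a :: ds ∧ 1 ≤ a ∧ a ≤ 9 := by
  have hne : Nat.digits 10 m.toNat ≠ [] := Nat.digits_ne_nil_iff_ne_zero.2 (by omega)
  have hsplit := List.dropLast_append_getLast hne
  have hlast : (Nat.digits 10 m.toNat).getLast hne ≠ 0 := Nat.getLast_digit_ne_zero 10 (by omega)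
  have hx10 : (Nat.digits 10 m.toNat).getLast hne < 10 :=
    Nat.digits_lt_base (by norm_num) (List.getLast_mem hne)
  refine ⟨((Nat.digits 10 m.toNat).getLast hne : Int),
    ((Nat.digits 10 m.toNat).dropLast.map (fun k : ℕ => (k : Int))).reverse, ?_, by omega, by omega⟩
  conv_lhs => rw [pvDig, ← hsplit]
  simp

theorem pvDig_len2 (m : Int) (hm : 10 ≤ m) : 2 ≤ (pvDig m).length := by
  have h := (Nat.lt_digits_length_iff (b := 10) (k := 1) (by norm_num) m.toNat).2 (by omega)
  simp only [pvDig, List.length_reverse, List.length_map]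
  omega

-- toDigits bridge
theorem pvToDigitsCore_eq (fuel : ℕ) : ∀ (m : ℕ) (acc : List Char), m < fuel →
    Nat.toDigitsCore 10 fuel m acc
      = ((Nat.digits 10 m).map Nat.digitChar).reverse ++ (if m = 0 then ['0'] else []) ++ acc := by
  induction fuel with
  | zero => omega
  | succ fuel ih =>
    intro m acc hm
    rw [Nat.toDigitsCore]
    by_cases h0 : m = 0
    · subst h0; simp; decide
    by_cases h1 : m / 10 = 0
    · have hlt : m < 10 := by omega
      rw [if_pos h1, Nat.digits_def' (by norm_num : (1:ℕ) < 10) (by omega), h1]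
      simp [Nat.mod_eq_of_lt hlt, h0]
    · rw [if_neg h1, ih (m / 10) _ (by omega)]
      rw [Nat.digits_def' (by norm_num : (1:ℕ) < 10) (Nat.pos_of_ne_zero h0)]
      rw [if_neg h1, if_neg h0]
      simp

theorem pvLst_eq (m : Int) (hm : 1 ≤ m) :
    (PySem.Int.toChars m).map (fun i => (i.toNat : Int) - 48) = pvDig m := by
  have h1 : PySem.Int.toChars m = Nat.toDigits 10 m.toNat := by
    rw [PySem.Int.toChars, if_neg (by omega)]
  rw [h1, Nat.toDigits, pvToDigitsCore_eq (m.toNat + 1) m.toNat [] (by omega),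
    if_neg (by omega)]
  simp only [List.append_nil, List.map_reverse, List.map_map, pvDig]
  congr 1
  apply List.map_congr_left
  intro k hk
  have hk10 : k < 10 := Nat.digits_lt_base (by norm_num) hk
  interval_cases k <;> decide

def pvChain (d : Int) : Int → List Int → Bool
  | _, [] => true
  | last, x :: xs => decide (last < x) && decide (x ≤ last + d) && decide (x ≤ 9) && pvChain d x xs

def pvChainQ (d : Int) : List Int → Bool
  | [] => true
  | a :: ds => pvChain d a ds

theorem pvChainQ_iff (d : Int) (L : List Int) :
    pvChainQ d L = true ↔
      ∀ i : ℕ, (h : i + 1 < L.length) → L[i] < L[i+1] ∧ L[i+1] ≤ L[i] + d ∧ L[i+1] ≤ 9 := by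
  induction L with
  | nil => simp [pvChainQ]
  | cons a t ih =>
    cases t with
    | nil => simp [pvChainQ, pvChain]
    | cons b t2 =>
      have step : pvChainQ d (a :: b :: t2) = true ↔
          ((a < b ∧ b ≤ a + d ∧ b ≤ 9) ∧ pvChainQ d (b :: t2) = true) := by
        show pvChain d a (b :: t2) = true ↔ _
        rw [pvChain]
        show _ ↔ _ ∧ pvChain d b t2 = true
        simp only [Bool.and_eq_true, decide_eq_true_eq]
        tauto
      rw [step, ih]
      constructor
      · rintro ⟨h1, h2⟩ i hi
        cases i with
        | zero => simpa using h1
        | succ j =>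
          have := h2 j (by simpa using Nat.lt_of_succ_lt_succ hi)
          simpa using this
      · intro h
        refine ⟨by simpa using h 0 (by simp), fun j hj => ?_⟩
        have := h (j+1) (by simpa using Nat.succ_lt_succ hj)
        simpa using this

theorem pairwise_lt_iff_adj (L : List Int) :
    L.Pairwise (· < ·) ↔ ∀ i : ℕ, (h : i + 1 < L.length) → L[i] < L[i+1] := by
  rw [← List.isChain_iff_pairwise, List.isChain_iff_getElem]

theorem nodup_of_sum_set (L : List Int) (hpos : ∀ x ∈ L, 1 ≤ x)
    (hsum : L.sum = (PySem.Set.ofList L).sum) : L.Nodup := by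
  have hperm : (PySem.Set.ofList L).Perm L.dedup :=
    (List.perm_ext_iff_of_nodup (PySem.Set.nodup_ofList L) (List.nodup_dedup L)).2
      (fun a => by simp [PySem.Set.mem_ofList, List.mem_dedup])
  obtain ⟨r, hr⟩ := (List.dedup_sublist L).exists_perm_append
  have hsum2 : L.sum = L.dedup.sum + r.sum := by rw [hr.sum_eq, List.sum_append]
  have hsumd : (PySem.Set.ofList L).sum = L.dedup.sum := hperm.sum_eq
  have hrpos : ∀ x ∈ r, 1 ≤ x := fun x hx =>
    hpos x (hr.symm.subset (List.mem_append_right _ hx))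
  have hrnil : r = [] := by
    cases r with
    | nil => rfl
    | cons y t =>
      have h1 : 1 ≤ y := hrpos y List.mem_cons_self
      have h2 : 0 ≤ t.sum :=
        List.sum_nonneg (fun x hx => le_trans zero_le_one (hrpos x (List.mem_cons_of_mem _ hx)))
      simp only [List.sum_cons] at hsum2
      omega
  subst hrnil
  exact ((hr.trans (by simp)).nodup_iff).2 (List.nodup_dedup L)

def pvA (d m : Int) : Bool :=
  let lst : List Int := (PySem.Int.toChars m).map (fun i => (i.toNat : Int) - 48)
  decide (lst = PySem.List.sorted lst (fun x => x) false ∧ lst.sum = (PySem.Set.ofList lst).sum) &&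
  decide ((PySem.List.pyRange 0 (PySem.List.len lst - 1) 1).foldl
      (fun cnt i =>
        if PySem.List.pyGetD lst (i + 1) 0 - PySem.List.pyGetD lst i 0 ≤ d then cnt + 1
        else cnt) 0
    = PySem.List.len lst - 1)

theorem sorted_eq_iff_pairwise (L : List Int) :
    L = PySem.List.sorted L (fun x => x) false ↔ L.Pairwise (· ≤ ·) := by
  constructor
  · intro h
    have hp := PySem.List.sorted_pairwise L (fun x => x)
    rwa [← h] at hp
  · intro h
    exact (PySem.List.sorted_eq_self_of_pairwise L (fun x => x) h).symm

-- the inner cnt loop condition, as an indexed ∀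
theorem cnt_iff (d : Int) (L : List Int) (hlen : 1 ≤ L.length) :
    ((PySem.List.pyRange 0 (PySem.List.len L - 1) 1).foldl
        (fun cnt i =>
          if PySem.List.pyGetD L (i + 1) 0 - PySem.List.pyGetD L i 0 ≤ d then cnt + 1
          else cnt) (0 : Int)
      = PySem.List.len L - 1)
    ↔ ∀ i : ℕ, (h : i + 1 < L.length) → L[i+1] - L[i] ≤ d := by
  have hconv : (fun (cnt : Int) (i : Int) =>
      if PySem.List.pyGetD L (i + 1) 0 - PySem.List.pyGetD L i 0 ≤ d then cnt + 1 else cnt)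
      = fun cnt i =>
        if (fun i => decide (PySem.List.pyGetD L (i + 1) 0 - PySem.List.pyGetD L i 0 ≤ d)) i = true
        then cnt + 1 else cnt := by
    funext cnt i; simp
  rw [hconv, PySem.List.foldl_count_if]
  rw [PySem.List.len_eq]
  have hrange : ((PySem.List.pyRange 0 ((L.length : Int) - 1) 1).length) = L.length - 1 := by
    rw [PySem.List.length_pyRange_one]; omega
  constructor
  · intro h i hi
    have hcnt : (PySem.List.pyRange 0 ((L.length : Int) - 1) 1).countP
        (fun i => decide (PySem.List.pyGetD L (i + 1) 0 - PySem.List.pyGetD L i 0 ≤ d))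
        = (PySem.List.pyRange 0 ((L.length : Int) - 1) 1).length := by
      have hle := List.countP_le_length (l := PySem.List.pyRange 0 ((L.length : Int) - 1) 1)
        (p := fun i => decide (PySem.List.pyGetD L (i + 1) 0 - PySem.List.pyGetD L i 0 ≤ d))
      omega
    have hall := List.countP_eq_length.1 hcnt (i : Int) (by
      rw [PySem.List.mem_pyRange_one]; omega)
    simp only [decide_eq_true_eq] at hall
    rw [PySem.List.pyGetD_eq_getElem L 0 (by omega) (by rw [Int.lt_iff_add_one_le]; omega),
        PySem.List.pyGetD_eq_getElem L 0 (by omega) (by omega)] at hall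
    have e1 : ((i : Int) + 1).toNat = i + 1 := by omega
    have e2 : ((i : Int)).toNat = i := by omega
    simp only [e1, e2] at hall
    exact hall
  · intro h
    have hcnt : (PySem.List.pyRange 0 ((L.length : Int) - 1) 1).countP
        (fun i => decide (PySem.List.pyGetD L (i + 1) 0 - PySem.List.pyGetD L i 0 ≤ d))
        = (PySem.List.pyRange 0 ((L.length : Int) - 1) 1).length := by
      apply List.countP_eq_length.2
      intro a ha
      rw [PySem.List.mem_pyRange_one] at ha
      simp only [decide_eq_true_eq]
      rw [PySem.List.pyGetD_eq_getElem L 0 (by omega) (by omega),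
          PySem.List.pyGetD_eq_getElem L 0 (by omega) (by omega)]
      have e1 : (a + 1).toNat = a.toNat + 1 := by omega
      simp only [e1]
      exact h a.toNat (by omega)
    omega


theorem pvA_eq_chain (d m : Int) (hm : 12 ≤ m) : pvA d m = pvChainQ d (pvDig m) := by
  rw [Bool.eq_iff_iff]
  have hlst := pvLst_eq m (by omega)
  rw [pvA]
  rw [hlst]
  obtain ⟨a, ds, hLa, ha1, ha9⟩ := pvDig_head m (by omega)
  have hlen2 := pvDig_len2 m (by omega)
  have hmem := pvDig_mem m
  simp only [Bool.and_eq_true, decide_eq_true_eq]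
  constructor
  · rintro ⟨⟨hs, hsum⟩, hcnt⟩
    have hple : (pvDig m).Pairwise (· ≤ ·) := (sorted_eq_iff_pairwise _).1 hs
    have hpos : ∀ x ∈ pvDig m, 1 ≤ x := by
      intro x hx
      rw [hLa] at hx hple
      rcases List.mem_cons.1 hx with rfl | hx
      · omega
      · have := (List.pairwise_cons.1 hple).1 x hx
        omega
    have hnodup := nodup_of_sum_set _ hpos hsum
    apply (pvChainQ_iff d _).2
    intro i hi
    have hle := List.pairwise_iff_getElem.1 hple i (i+1) (by omega) hi (by omega)
    have hne : (pvDig m)[i] ≠ (pvDig m)[i+1] := by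
      intro he
      have := (hnodup.getElem_inj_iff).1 he
      omega
    have hgap := (cnt_iff d _ (by omega)).1 hcnt i hi
    have h9 := (hmem _ (List.getElem_mem hi)).2
    refine ⟨lt_of_le_of_ne hle hne, by omega, by omega⟩
  · intro hch
    have hadj := (pvChainQ_iff d _).1 hch
    have hplt : (pvDig m).Pairwise (· < ·) :=
      (pairwise_lt_iff_adj _).2 (fun i h => (hadj i h).1)
    have hnodup : (pvDig m).Nodup := hplt.imp ne_of_lt
    refine ⟨⟨(sorted_eq_iff_pairwise _).2 (hplt.imp le_of_lt), ?_⟩,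
      (cnt_iff d _ (by omega)).2 (fun i h => by have := (hadj i h).2.1; omega)⟩
    rw [PySem.Set.ofList_eq_self_of_nodup _ hnodup]

def pvGen (n : Int) (d : Int) (v : Int) (last : Int) : List Int :=
  v :: (PySem.List.pyRange (last + 1) (min 9 (last + d) + 1) 1).attach.flatMap
    (fun nd => if v * 10 + nd.1 ≤ n then pvGen n d (v * 10 + nd.1) nd.1 else [])
termination_by (9 - last).toNat
decreasing_by
  have h := (PySem.List.mem_pyRange_one).1 nd.2
  omega

theorem pvCountP_flatMap {α : Type} (l : List α) (f : α → List Int) (p : Int → Bool) :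
    (l.flatMap f).countP p = (l.map (fun x => (f x).countP p)).sum := by
  induction l with
  | nil => simp
  | cons a t ih => simp [List.flatMap_cons, List.countP_append, ih]

theorem pvGo_eq_countP (n d : Int) : ∀ (k : Nat) (v last : Int), (9 - last).toNat ≤ k →
    pvGo n d v last = ((pvGen n d v last).countP (fun m => decide (12 ≤ m ∧ m ≤ n)) : Int) := by
  intro k
  induction k with
  | zero =>
    intro v last hk
    have hnil : PySem.List.pyRange (last + 1) (min 9 (last + d) + 1) 1 = [] :=
      PySem.List.pyRange_one_eq_nil (by omega)
    rw [pvGo, pvGen, hnil]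
    simp only [List.attach_nil, List.foldl_nil, List.flatMap_nil, List.countP_cons,
      List.countP_nil, List.length_nil]
    simp only [decide_eq_true_eq, Nat.cast_add, Nat.cast_ite, Nat.cast_one, Nat.cast_zero, Nat.cast_zero, Nat.cast_ofNat, zero_add]
  | succ k ih =>
    intro v last hk
    rw [pvGo, pvGen]
    have hbody : (fun (c : Int) (nd : {x // x ∈ PySem.List.pyRange (last + 1) (min 9 (last + d) + 1) 1}) =>
        if v * 10 + nd.1 ≤ n then c + pvGo n d (v * 10 + nd.1) nd.1 else c)
        = fun c nd => c + (if v * 10 + nd.1 ≤ n then pvGo n d (v * 10 + nd.1) nd.1 else 0) := by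
      funext c nd
      split_ifs <;> simp
    rw [hbody, PySem.List.foldl_add]
    rw [List.countP_cons, pvCountP_flatMap]
    have hmaps : (PySem.List.pyRange (last + 1) (min 9 (last + d) + 1) 1).attach.map
          (fun nd => if v * 10 + nd.1 ≤ n then pvGo n d (v * 10 + nd.1) nd.1 else 0)
        = (PySem.List.pyRange (last + 1) (min 9 (last + d) + 1) 1).attach.map
          (fun nd => (((if v * 10 + nd.1 ≤ n then pvGen n d (v * 10 + nd.1) nd.1 else []).countP
              (fun m => decide (12 ≤ m ∧ m ≤ n)) : ℕ) : Int)) := by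
      apply List.map_congr_left
      intro nd _
      have hnd := (PySem.List.mem_pyRange_one).1 nd.2
      split_ifs
      · exact ih (v * 10 + nd.1) nd.1 (by omega)
      · simp
    rw [hmaps]
    rw [Nat.cast_add, Nat.cast_list_sum, List.map_map]
    simp only [Function.comp_def]
    simp only [decide_eq_true_eq, Nat.cast_ite, Nat.cast_one, Nat.cast_zero]
    ring

theorem pvChain_bounds (d last : Int) (ds : List Int) (hl : 0 ≤ last) (hc : pvChain d last ds = true) :
    ∀ x ∈ ds, 1 ≤ x ∧ x ≤ 9 := by
  induction ds generalizing last with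
  | nil => simp
  | cons y t ih =>
    rw [pvChain] at hc
    simp only [Bool.and_eq_true, decide_eq_true_eq] at hc
    obtain ⟨⟨⟨h1, _⟩, h3⟩, h4⟩ := hc
    intro x hx
    rcases List.mem_cons.1 hx with rfl | hx
    · omega
    · exact ih y (by omega) h4 x hx

theorem mem_pvGen (n d : Int) : ∀ (k : Nat) (v last m : Int), (9 - last).toNat ≤ k →
    1 ≤ v → 0 ≤ last →
    (m ∈ pvGen n d v last ↔
      m = v ∨ ∃ ds, ds ≠ [] ∧ pvChain d last ds = true ∧ m = pvExt v ds ∧ m ≤ n) := by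
  intro k
  induction k with
  | zero =>
    intro v last m hk hv hl
    have hnil : PySem.List.pyRange (last + 1) (min 9 (last + d) + 1) 1 = [] :=
      PySem.List.pyRange_one_eq_nil (by omega)
    rw [pvGen, hnil]
    simp only [List.attach_nil, List.flatMap_nil, List.mem_singleton]
    constructor
    · exact fun h => Or.inl h
    · rintro (h | ⟨ds, hne, hch, _, _⟩)
      · exact h
      · cases ds with
        | nil => exact absurd rfl hne
        | cons x t =>
          rw [pvChain] at hch
          simp only [Bool.and_eq_true, decide_eq_true_eq] at hch
          omega
  | succ k ih =>
    intro v last m hk hv hl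
    rw [pvGen]
    simp only [List.mem_cons, List.mem_flatMap, List.mem_attach, true_and, Subtype.exists]
    constructor
    · rintro (rfl | ⟨nd, hndmem, hm⟩)
      · exact Or.inl rfl
      · right
        have hnd := (PySem.List.mem_pyRange_one).1 hndmem
        split_ifs at hm with hle
        · rcases (ih (v * 10 + nd) nd m (by omega) (by omega) (by omega)).1 hm with rfl | ⟨ds, hne, hch, hext, hmn⟩
          · refine ⟨[nd], by simp, ?_, by simp [pvExt], hle⟩
            rw [pvChain]
            simp only [Bool.and_eq_true, decide_eq_true_eq, pvChain]
            refine ⟨⟨⟨by omega, by omega⟩, by omega⟩, trivial⟩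
          · refine ⟨nd :: ds, by simp, ?_, ?_, hmn⟩
            · rw [pvChain]
              simp only [Bool.and_eq_true, decide_eq_true_eq]
              exact ⟨⟨⟨by omega, by omega⟩, by omega⟩, hch⟩
            · simp only [pvExt, List.foldl_cons] at hext ⊢
              exact hext
        · simp at hm
    · rintro (rfl | ⟨ds, hne, hch, hext, hmn⟩)
      · exact Or.inl rfl
      · right
        cases ds with
        | nil => exact absurd rfl hne
        | cons x t =>
          rw [pvChain] at hch
          simp only [Bool.and_eq_true, decide_eq_true_eq] at hch
          obtain ⟨⟨⟨hx1, hx2⟩, hx9⟩, hcht⟩ := hch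
          have hxmem : x ∈ PySem.List.pyRange (last + 1) (min 9 (last + d) + 1) 1 :=
            (PySem.List.mem_pyRange_one).2 (by omega)
          have hbound := pvChain_bounds d x t (by omega) hcht
          have hvx : v * 10 + x ≤ n := by
            have hle2 : v * 10 + x ≤ pvExt (v * 10 + x) t :=
              pvExt_le _ t (by omega) (fun y hy => by have := hbound y hy; omega)
            simp only [pvExt, List.foldl_cons] at hext
            simp only [pvExt] at hle2
            omega
          refine ⟨x, hxmem, ?_⟩
          rw [if_pos hvx]
          apply (ih (v * 10 + x) x m (by omega) (by omega) (by omega)).2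
          cases t with
          | nil =>
            left
            simpa [pvExt] using hext
          | cons y t2 =>
            right
            refine ⟨y :: t2, by simp, hcht, ?_, hmn⟩
            simp only [pvExt, List.foldl_cons] at hext ⊢
            exact hext

theorem pvGen_shape (n d v last m : Int) (hv : 1 ≤ v) (hl : 0 ≤ last)
    (h : m ∈ pvGen n d v last) :
    m = v ∨ ∃ t, t ≠ [] ∧ pvChain d last t = true ∧ pvDig m = pvDig v ++ t := by
  rcases (mem_pvGen n d (9 - last).toNat v last m (le_refl _) hv hl).1 h with rfl | ⟨ds, hne, hch, hext, _⟩
  · exact Or.inl rfl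
  · right
    refine ⟨ds, hne, hch, ?_⟩
    rw [hext]
    exact pvDig_ext v ds hv (fun x hx => by have := pvChain_bounds d last ds hl hch x hx; omega)

theorem nodup_pvGen (n d : Int) : ∀ (k : Nat) (v last : Int), (9 - last).toNat ≤ k →
    1 ≤ v → 0 ≤ last → (pvGen n d v last).Nodup := by
  intro k
  induction k with
  | zero =>
    intro v last hk hv hl
    have hnil : PySem.List.pyRange (last + 1) (min 9 (last + d) + 1) 1 = [] :=
      PySem.List.pyRange_one_eq_nil (by omega)
    rw [pvGen, hnil]
    simp
  | succ k ih =>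
    intro v last hk hv hl
    rw [pvGen]
    have key : ∀ nd : {x // x ∈ PySem.List.pyRange (last + 1) (min 9 (last + d) + 1) 1},
        ∀ m, m ∈ (if v * 10 + nd.1 ≤ n then pvGen n d (v * 10 + nd.1) nd.1 else []) →
        ∃ t, pvDig m = pvDig v ++ nd.1 :: t := by
      rintro nd m hm
      have hnd := (PySem.List.mem_pyRange_one).1 nd.2
      split_ifs at hm with hle
      · have hdigv : pvDig (v * 10 + nd.1) = pvDig v ++ [nd.1] :=
          pvDig_append v nd.1 hv (by omega) (by omega)
        rcases pvGen_shape n d (v * 10 + nd.1) nd.1 m (by omega) (by omega) hm with rfl | ⟨t, _, _, hd⟩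
        · exact ⟨[], by rw [hdigv]⟩
        · exact ⟨t, by rw [hd, hdigv, List.append_assoc]; rfl⟩
      · simp at hm
    rw [List.nodup_cons]
    constructor
    · intro hvmem
      rw [List.mem_flatMap] at hvmem
      obtain ⟨nd, _, hm⟩ := hvmem
      have hnd := (PySem.List.mem_pyRange_one).1 nd.2
      split_ifs at hm with hle
      · rcases (mem_pvGen n d (9 - nd.1).toNat (v * 10 + nd.1) nd.1 v (le_refl _)
            (by omega) (by omega)).1 hm with he | ⟨ds, hne, hch, hext, _⟩
        · omega
        · have hge : v * 10 + nd.1 ≤ pvExt (v * 10 + nd.1) ds :=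
            pvExt_le _ ds (by omega)
              (fun x hx => by have := pvChain_bounds d nd.1 ds (by omega) hch x hx; omega)
          omega
      · simp at hm
    · apply List.nodup_flatMap.2
      constructor
      · rintro nd -
        have hnd := (PySem.List.mem_pyRange_one).1 nd.2
        split_ifs with hle
        · exact ih (v * 10 + nd.1) nd.1 (by omega) (by omega) (by omega)
        · simp
      · have hatt : (PySem.List.pyRange (last + 1) (min 9 (last + d) + 1) 1).attach.Nodup :=
          List.nodup_attach.2 (PySem.List.nodup_pyRange_one _ _)
        apply hatt.imp
        intro nd1 nd2 hne m hm1 hm2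
        obtain ⟨t1, h1⟩ := key nd1 m hm1
        obtain ⟨t2, h2⟩ := key nd2 m hm2
        rw [h1] at h2
        have := List.append_cancel_left h2
        simp only [List.cons.injEq] at this
        exact absurd (Subtype.ext this.1) hne

theorem selA_eq_filter (n d : Int) (hn : 0 ≤ n) :
    sel_number n d = (((PySem.List.pyRange 12 (n + 1) 1).filter (pvA d)).length : Int) := by
  rw [sel_number, if_neg (by
    rw [PySem.Int.floordiv_eq_ediv_of_pos (by norm_num)]
    have := Int.ediv_nonneg hn (by norm_num : (0:Int) ≤ 10)
    omega)]
  have hbody : (fun (result : List Int) (num : Int) =>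
      let lst : List Int := (PySem.Int.toChars num).map (fun i => (i.toNat : Int) - 48)
      if lst = PySem.List.sorted lst (fun x => x) false ∧ lst.sum = (PySem.Set.ofList lst).sum then
        let cnt : Int := (PySem.List.pyRange 0 (PySem.List.len lst - 1) 1).foldl
          (fun cnt i =>
            if PySem.List.pyGetD lst (i + 1) 0 - PySem.List.pyGetD lst i 0 ≤ d then cnt + 1
            else cnt) 0
        if cnt = PySem.List.len lst - 1 then result ++ [num] else result
      else result)
      = fun result num => if pvA d num = true then result ++ [(fun x => x) num] else result := by
    funext result num
    show _ = if pvA d num = true then result ++ [num] else result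
    rw [pvA]
    simp only [Bool.and_eq_true, decide_eq_true_eq]
    split_ifs with h1 h2 h3 h4 <;> first | rfl | (exfalso; tauto)
  rw [hbody, PySem.List.foldl_append_if]
  rw [List.map_id', List.nil_append, PySem.List.len_eq]

theorem selB_eq_countP (n d : Int) :
    sel_number_alt n d
      = (((PySem.List.pyRange 1 10 1).flatMap (fun a => pvGen n d a a)).countP
          (fun m => decide (12 ≤ m ∧ m ≤ n)) : Int) := by
  rw [sel_number_alt, pvCountP_flatMap, Nat.cast_list_sum, List.map_map]
  congr 1
  apply List.map_congr_left
  intro a _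
  exact pvGo_eq_countP n d (9 - a).toNat a a (le_refl _)

theorem pvGen_root_shape (n d a m : Int) (ha1 : 1 ≤ a) (ha9 : a ≤ 9)
    (h : m ∈ pvGen n d a a) : ∃ t, pvDig m = a :: t := by
  rcases pvGen_shape n d a a m ha1 (by omega) h with he | ⟨t, _, _, hd⟩
  · exact ⟨[], by rw [he, pvDig_single a ha1 ha9]⟩
  · exact ⟨t, by rw [hd, pvDig_single a ha1 ha9]; rfl⟩

theorem mem_filter_forest (n d m : Int) :
    (m ∈ ((PySem.List.pyRange 1 10 1).flatMap (fun a => pvGen n d a a)).filter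
        (fun m => decide (12 ≤ m ∧ m ≤ n)))
      ↔ (12 ≤ m ∧ m ≤ n) ∧ pvChainQ d (pvDig m) = true := by
  rw [List.mem_filter]
  simp only [decide_eq_true_eq, List.mem_flatMap]
  constructor
  · rintro ⟨⟨a, hamem, hm⟩, h12⟩
    refine ⟨h12, ?_⟩
    have ha := (PySem.List.mem_pyRange_one).1 hamem
    rcases pvGen_shape n d a a m (by omega) (by omega) hm with rfl | ⟨t, _, hch, hd⟩
    · omega
    · rw [hd, pvDig_single a (by omega) (by omega)]
      exact hch
  · rintro ⟨h12, hch⟩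
    refine ⟨?_, h12⟩
    obtain ⟨a, ds, hLa, ha1, ha9⟩ := pvDig_head m (by omega)
    have hlen2 := pvDig_len2 m (by omega)
    have hdsne : ds ≠ [] := by
      intro he
      rw [he] at hLa
      rw [hLa] at hlen2
      simp at hlen2
    have hcha : pvChain d a ds = true := by
      rw [hLa] at hch
      exact hch
    have hmext : m = pvExt a ds := by
      have h0 := pvExt_dig m (by omega)
      rw [hLa] at h0
      simp only [pvExt, List.foldl_cons, zero_mul, zero_add] at h0
      simpa [pvExt] using h0.symm
    refine ⟨a, (PySem.List.mem_pyRange_one).2 (by omega), ?_⟩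
    exact (mem_pvGen n d (9 - a).toNat a a m (le_refl _) (by omega) (by omega)).2
      (Or.inr ⟨ds, hdsne, hcha, hmext, h12.2⟩)

theorem mem_filter_range (n d m : Int) :
    (m ∈ (PySem.List.pyRange 12 (n + 1) 1).filter (pvA d))
      ↔ (12 ≤ m ∧ m ≤ n) ∧ pvChainQ d (pvDig m) = true := by
  rw [List.mem_filter]
  constructor
  · rintro ⟨hmem, hA⟩
    have h := (PySem.List.mem_pyRange_one).1 hmem
    have h12 : 12 ≤ m ∧ m ≤ n := by omega
    exact ⟨h12, by rw [← pvA_eq_chain d m h12.1]; exact hA⟩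
  · rintro ⟨h12, hch⟩
    exact ⟨(PySem.List.mem_pyRange_one).2 (by omega), by rw [pvA_eq_chain d m h12.1]; exact hch⟩

theorem nodup_forest (n d : Int) :
    ((PySem.List.pyRange 1 10 1).flatMap (fun a => pvGen n d a a)).Nodup := by
  apply List.nodup_flatMap.2
  constructor
  · intro a hamem
    have ha := (PySem.List.mem_pyRange_one).1 hamem
    exact nodup_pvGen n d (9 - a).toNat a a (le_refl _) (by omega) (by omega)
  · have hnd : (PySem.List.pyRange 1 10 1).Pairwise (· ≠ ·) :=
      PySem.List.nodup_pyRange_one 1 10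
    refine List.Pairwise.imp_of_mem ?_ hnd
    intro a b hamem hbmem hne m hm1 hm2
    have ha := (PySem.List.mem_pyRange_one).1 hamem
    have hb := (PySem.List.mem_pyRange_one).1 hbmem
    obtain ⟨t1, h1⟩ := pvGen_root_shape n d a m (by omega) (by omega) hm1
    obtain ⟨t2, h2⟩ := pvGen_root_shape n d b m (by omega) (by omega) hm2
    rw [h1] at h2
    simp only [List.cons.injEq] at h2
    exact hne h2.1
  
-- ===== VERDICT (by name: the statement is the Claim_ definition above) =====
theorem sel_number_spec : Claim_equal_sel_number := by
  intro n d _hdom hpre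
  unfold Spec_sel_number
  rw [selA_eq_filter n d hpre, selB_eq_countP n d,
    List.countP_eq_length_filter]
  congr 1
  apply List.Perm.length_eq
  apply (List.perm_ext_iff_of_nodup
    ((PySem.List.nodup_pyRange_one 12 (n+1)).filter _)
    ((nodup_forest n d).filter _)).2
  intro m
  rw [mem_filter_range n d m, mem_filter_forest n d m]
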